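-- pv_equiv track=rewrite | github.com/Luka-Zu/I2P_Homeworks | Python_Homeworks/ciphers/ciphers.py | encryptCaesarCipher
-- ===== SOURCE A (Python) =====
-- def encryptCaesarCipher(text, key1, key2):
--     result=""
--     k=0
--
--     for x in text:
--
--
--         if k%2==0:
--             if (ord(x)>=ord('0') and ord(x)<=ord('9')):
--                 x=(int(str(x))+key1 ) % 10
--                 result+=str(x)
--             elif (    ( ord(x)>=ord('a') and ord(x)<=ord('z')   ) or( ord(x)>=ord('A') and ord(x)<=ord('Z')   )  ):
--                 if(ord(x)>= ord('a')):
--                     x=  chr(  ( ((ord(x)-ord('a')) +key1 ) % 26)+ord('a')  )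
--                     result+=str(x)
--                 else:
--                     x=  chr(  ( ((ord(x)-ord('A')) +key1 ) % 26)+ord('A')  )
--                     result+=str(x)
--             else:
--                 result+=x
--         else:
--             if (ord(x)>=ord('0') and ord(x)<=ord('9')):
--                 x=(int(str(x))+key2) % 10
--                 result+=str(x)
--             elif ( ( ord(x)>=ord('a') and ord(x)<=ord('z')   ) or( ord(x)>=ord('A') and ord(x)<=ord('Z')   ) ):
--                 if(ord(x)>= ord('a')):
--                     x=  chr(  ( ((ord(x)-ord('a')) +key2 ) % 26)+ord('a')  )
--                     result+=str(x)
--                 else: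
--                     x=  chr(  ( ((ord(x)-ord('A')) +key2 ) % 26)+ord('A')  )
--                     result+=str(x)
--             else:
--                 result+=x
--         k+=1
--     return result
-- ===== SOURCE B (Python) =====
-- def _shift(c, key):
--     if '0' <= c <= '9':
--         return chr((ord(c) - 48 + key) % 10 + 48)
--     if 'a' <= c <= 'z':
--         return chr((ord(c) - 97 + key) % 26 + 97)
--     if 'A' <= c <= 'Z':
--         return chr((ord(c) - 65 + key) % 26 + 65)
--     return c
--
-- def encryptCaesarCipher(text, key1, key2):
--     evens = [_shift(c, key1) for c in text[::2]]
--     odds = [_shift(c, key2) for c in text[1::2]]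
--     pairs = [e + o for e, o in zip(evens, odds)]
--     return "".join(pairs) + "".join(evens[len(odds):])
-- ===== Notes on version B (the rewrite author's own statement) =====
-- stated objective: faster
-- what changed: Replaced A's single alternating pass with an index-parity counter and duplicated branch trees by a staged decomposition: slice the text into the even-position and odd-position subsequences (text[::2], text[1::2]), Caesar-shift each slice with its own key in an independent pass, then riffle-merge the two encrypted streams (zip plus the leftover even character); the strided slicing, list comprehensions and joins do the per-character bookkeeping in C instead of Python-level string concatenation and a parity test per character.
import Mathlib
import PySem

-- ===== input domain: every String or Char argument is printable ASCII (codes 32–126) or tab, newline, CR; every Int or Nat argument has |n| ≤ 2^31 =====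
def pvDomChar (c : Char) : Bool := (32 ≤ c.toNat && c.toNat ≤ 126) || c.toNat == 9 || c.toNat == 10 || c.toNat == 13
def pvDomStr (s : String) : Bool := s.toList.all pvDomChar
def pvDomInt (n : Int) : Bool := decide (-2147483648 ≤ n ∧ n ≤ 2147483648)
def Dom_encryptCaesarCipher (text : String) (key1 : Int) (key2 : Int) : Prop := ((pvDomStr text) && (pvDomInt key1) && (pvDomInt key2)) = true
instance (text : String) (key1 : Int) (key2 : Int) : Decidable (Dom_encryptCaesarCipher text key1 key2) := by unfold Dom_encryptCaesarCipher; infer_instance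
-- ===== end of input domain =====

-- B replaces A's single alternating-counter pass by staged passes: slice the text into the
-- even- and odd-position subsequences, shift each with its own key, and riffle-merge the results.

-- ===== PORT A =====
-- A-side helper: the loop body of A, named so the fold is readable; it is A's code step for step.
-- 'int(str(x))' on a digit character is ported as '(PySem.Int.ofChars? [x]).getD 0', exact in this
-- branch since ofChars? returns 'some' on every single ASCII digit.
def pvStepA (key1 key2 : Int) (st : List Char × Int) (x : Char) : List Char × Int :=
  let result := st.1
  let k := st.2
  if PySem.Int.mod k 2 = 0 then
    if 48 ≤ x.toNat ∧ x.toNat ≤ 57 then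
      (result ++ PySem.Int.toChars (PySem.Int.mod ((PySem.Int.ofChars? [x]).getD 0 + key1) 10), k + 1)
    else if (97 ≤ x.toNat ∧ x.toNat ≤ 122) ∨ (65 ≤ x.toNat ∧ x.toNat ≤ 90) then
      if 97 ≤ x.toNat then
        (result ++ [Char.ofNat ((PySem.Int.mod (((x.toNat : Int) - 97) + key1) 26) + 97).toNat], k + 1)
      else
        (result ++ [Char.ofNat ((PySem.Int.mod (((x.toNat : Int) - 65) + key1) 26) + 65).toNat], k + 1)
    else (result ++ [x], k + 1)
  else
    if 48 ≤ x.toNat ∧ x.toNat ≤ 57 then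
      (result ++ PySem.Int.toChars (PySem.Int.mod ((PySem.Int.ofChars? [x]).getD 0 + key2) 10), k + 1)
    else if (97 ≤ x.toNat ∧ x.toNat ≤ 122) ∨ (65 ≤ x.toNat ∧ x.toNat ≤ 90) then
      if 97 ≤ x.toNat then
        (result ++ [Char.ofNat ((PySem.Int.mod (((x.toNat : Int) - 97) + key2) 26) + 97).toNat], k + 1)
      else
        (result ++ [Char.ofNat ((PySem.Int.mod (((x.toNat : Int) - 65) + key2) 26) + 65).toNat], k + 1)
    else (result ++ [x], k + 1)

def encryptCaesarCipher (text : String) (key1 : Int) (key2 : Int) : String :=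
  String.ofList (text.toList.foldl (pvStepA key1 key2) ([], 0)).1

-- ===== PORT B =====
-- Source B's _shift: the three chained range tests in order, else the character unchanged.
def pvShiftB (c : Char) (key : Int) : Char :=
  if 48 ≤ c.toNat ∧ c.toNat ≤ 57 then
    Char.ofNat ((PySem.Int.mod (((c.toNat : Int) - 48) + key) 10) + 48).toNat
  else if 97 ≤ c.toNat ∧ c.toNat ≤ 122 then
    Char.ofNat ((PySem.Int.mod (((c.toNat : Int) - 97) + key) 26) + 97).toNat
  else if 65 ≤ c.toNat ∧ c.toNat ≤ 90 then
    Char.ofNat ((PySem.Int.mod (((c.toNat : Int) - 65) + key) 26) + 65).toNat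
  else c

-- text[::2] and text[1::2] are the extended slices; zip + leftover slice is the riffle merge.
def encryptCaesarCipher_alt (text : String) (key1 : Int) (key2 : Int) : String :=
  let evens := ((PySem.List.slice? text.toList none none 2).getD []).map (fun c => pvShiftB c key1)
  let odds := ((PySem.List.slice? text.toList (some 1) none 2).getD []).map (fun c => pvShiftB c key2)
  let pairs := (evens.zip odds).map (fun p => [p.1, p.2])
  String.ofList (pairs.flatten ++ PySem.List.slice evens (some (odds.length : Int)) none)

-- ===== PRECONDITION & SPEC =====
def Spec_encryptCaesarCipher (text : String) (key1 : Int) (key2 : Int) (out : String) : Prop := out = encryptCaesarCipher_alt text key1 key2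
instance (text : String) (key1 : Int) (key2 : Int) (out : String) : Decidable (Spec_encryptCaesarCipher text key1 key2 out) := by unfold Spec_encryptCaesarCipher; infer_instance

-- ===== CLAIM =====
def Claim_equal_encryptCaesarCipher : Prop := ∀ (text : String) (key1 : Int) (key2 : Int), Dom_encryptCaesarCipher text key1 key2 → Spec_encryptCaesarCipher text key1 key2 (encryptCaesarCipher text key1 key2)

-- ===== LEMMAS AND PROOFS =====

-- every-other-element of a list, the value of a step-2 slice
def pvEO {α : Type} : List α → List α
  | [] => []
  | [c] => [c]
  | c :: _ :: cs => c :: pvEO cs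

-- the per-character encoding A performs (as a list of characters, A's code shapes)
def pvEncA (key : Int) (x : Char) : List Char :=
  if 48 ≤ x.toNat ∧ x.toNat ≤ 57 then
    PySem.Int.toChars (PySem.Int.mod ((PySem.Int.ofChars? [x]).getD 0 + key) 10)
  else if (97 ≤ x.toNat ∧ x.toNat ≤ 122) ∨ (65 ≤ x.toNat ∧ x.toNat ≤ 90) then
    if 97 ≤ x.toNat then
      [Char.ofNat ((PySem.Int.mod (((x.toNat : Int) - 97) + key) 26) + 97).toNat]
    else
      [Char.ofNat ((PySem.Int.mod (((x.toNat : Int) - 65) + key) 26) + 65).toNat]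
  else [x]

-- A's normal form: alternate the two keys, starting with key1
def pvAlt (key1 key2 : Int) : List Char → List Char
  | [] => []
  | c :: cs => pvEncA key1 c ++ pvAlt key2 key1 cs

theorem pv_mod_parity (k : Int) :
    PySem.Int.mod (k + 1) 2 = 0 ↔ ¬ PySem.Int.mod k 2 = 0 := by
  simp only [PySem.Int.mod, Int.fmod_eq_emod]
  omega

theorem pv_stepA_eq (key1 key2 : Int) (res : List Char) (k : Int) (x : Char) :
    pvStepA key1 key2 (res, k) x
      = (res ++ (if PySem.Int.mod k 2 = 0 then pvEncA key1 x else pvEncA key2 x), k + 1) := by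
  unfold pvStepA pvEncA
  dsimp only
  split_ifs <;> rfl

theorem pv_foldA (key1 key2 : Int) (cs : List Char) (res : List Char) (k : Int) :
    (cs.foldl (pvStepA key1 key2) (res, k)).1
      = res ++ (if PySem.Int.mod k 2 = 0 then pvAlt key1 key2 cs else pvAlt key2 key1 cs) := by
  induction cs generalizing res k with
  | nil => simp [pvAlt]
  | cons c cs ih =>
    rw [List.foldl_cons, pv_stepA_eq, ih, List.append_assoc]
    by_cases h : PySem.Int.mod k 2 = 0
    · have h1 : ¬ PySem.Int.mod (k + 1) 2 = 0 := fun hc => ((pv_mod_parity k).mp hc) h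
      rw [if_pos h, if_neg h1, if_pos h]
      rfl
    · have h1 : PySem.Int.mod (k + 1) 2 = 0 := (pv_mod_parity k).mpr h
      rw [if_neg h, if_pos h1, if_neg h]
      rfl

-- toChars of a single decimal digit
theorem pv_toChars_digit (m : Int) (h0 : 0 ≤ m) (h1 : m < 10) :
    PySem.Int.toChars m = [Char.ofNat (m + 48).toNat] := by
  interval_cases m <;> decide

-- A's per-character encoding is exactly Source B's _shift (as a one-character list), for every char
theorem pv_encA_eq_shiftB (key : Int) (c : Char) :
    pvEncA key c = [pvShiftB c key] := by
  unfold pvEncA pvShiftB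
  by_cases hd : 48 ≤ c.toNat ∧ c.toNat ≤ 57
  · simp only [if_pos hd]
    have hof : (PySem.Int.ofChars? [c]).getD 0 = (c.toNat : Int) - 48 := by
      obtain ⟨h1, h2⟩ := hd
      have hc := (Char.ofNat_toNat c).symm
      interval_cases h : c.toNat <;> (rw [hc]; decide)
    rw [hof]
    have hm0 : 0 ≤ PySem.Int.mod ((c.toNat : Int) - 48 + key) 10 := by
      simp only [PySem.Int.mod, Int.fmod_eq_emod]; omega
    have hm1 : PySem.Int.mod ((c.toNat : Int) - 48 + key) 10 < 10 := by
      simp only [PySem.Int.mod, Int.fmod_eq_emod]; omega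
    rw [pv_toChars_digit _ hm0 hm1]
  · by_cases hl : 97 ≤ c.toNat ∧ c.toNat ≤ 122
    · simp only [if_neg hd, if_pos hl, if_pos (Or.inl hl), if_pos hl.1]
    · by_cases hu : 65 ≤ c.toNat ∧ c.toNat ≤ 90
      · have h97 : ¬ 97 ≤ c.toNat := by omega
        simp only [if_neg hd, if_neg hl, if_pos hu, if_pos (Or.inr hu), if_neg h97]
      · simp only [if_neg hd, if_neg hl, if_neg hu]
        rw [if_neg (by tauto)]

-- the step-2 slices evaluate to pvEO
theorem pv_filterMap_even {α : Type} (xs : List α) :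
    List.filterMap (fun k : Nat => xs[2 * k]?) (List.range ((xs.length + 1) / 2)) = pvEO xs := by
  induction xs using pvEO.induct with
  | case1 => simp [pvEO]
  | case2 c => simp [pvEO, List.range_succ]
  | case3 c d cs ih =>
    have hlen : ((c :: d :: cs).length + 1) / 2 = (cs.length + 1) / 2 + 1 := by
      simp only [List.length_cons]; omega
    rw [hlen, List.range_succ_eq_map, List.filterMap_cons]
    have hf : List.filterMap (fun k : Nat => (c :: d :: cs)[2 * k]?)
        ((List.range ((cs.length + 1) / 2)).map Nat.succ)
        = List.filterMap (fun k : Nat => cs[2 * k]?) (List.range ((cs.length + 1) / 2)) := by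
      rw [List.filterMap_map]
      apply List.filterMap_congr
      intro k _
      have h2 : 2 * Nat.succ k = 2 * k + 1 + 1 := by omega
      simp [Function.comp, h2]
    simp only [List.getElem?_cons_zero, Nat.mul_zero]
    rw [hf, ih]
    rfl

theorem pv_filterMap_odd {α : Type} (xs : List α) :
    List.filterMap (fun k : Nat => xs[1 + 2 * k]?) (List.range (xs.length / 2)) = pvEO xs.tail := by
  induction xs using pvEO.induct with
  | case1 => simp [pvEO]
  | case2 c => simp [pvEO]
  | case3 c d cs ih =>
    have hlen : (c :: d :: cs).length / 2 = cs.length / 2 + 1 := by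
      simp only [List.length_cons]; omega
    rw [hlen, List.range_succ_eq_map, List.filterMap_cons]
    have hf : List.filterMap (fun k : Nat => (c :: d :: cs)[1 + 2 * k]?)
        ((List.range (cs.length / 2)).map Nat.succ)
        = List.filterMap (fun k : Nat => cs[1 + 2 * k]?) (List.range (cs.length / 2)) := by
      rw [List.filterMap_map]
      apply List.filterMap_congr
      intro k _
      have h2 : 1 + 2 * Nat.succ k = 1 + 2 * k + 1 + 1 := by omega
      simp [Function.comp, h2]
    simp only [Nat.mul_zero]
    rw [hf, ih]
    have heo2 : pvEO (d :: cs) = d :: pvEO cs.tail := by cases cs <;> rfl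
    simp [heo2]

theorem pv_slice2_even {α : Type} (xs : List α) :
    PySem.List.slice? xs none none 2 = some (pvEO xs) := by
  rw [← pv_filterMap_even]
  simp only [PySem.List.slice?, PySem.List.sliceIndices]
  norm_num
  have hc : (if 0 < xs.length then (((xs.length : Int) + 2 - 1) / 2).toNat else 0)
      = (xs.length + 1) / 2 := by
    split_ifs with h <;> omega
  rw [hc]
  apply List.filterMap_congr
  intro k _
  have h2 : ((2 : Int) * (k : Nat)).toNat = 2 * k := by omega
  rw [h2]

theorem pv_slice2_odd {α : Type} (xs : List α) :
    PySem.List.slice? xs (some 1) none 2 = some (pvEO xs.tail) := by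
  rw [← pv_filterMap_odd]
  simp only [PySem.List.slice?, PySem.List.sliceIndices]
  norm_num
  have hc : (if 1 < xs.length then (((xs.length : Int) - min 1 (xs.length : Int) + 2 - 1) / 2).toNat else 0)
      = xs.length / 2 := by
    split_ifs with h <;> omega
  rw [hc]
  apply List.filterMap_congr
  intro k hk
  have hk' : k < xs.length / 2 := List.mem_range.mp hk
  have h2 : (min 1 (xs.length : Int) + 2 * (k : Nat)).toNat = 1 + 2 * k := by omega
  rw [h2]

-- the riffle of the two shifted halves is A's alternating normal form
theorem pv_riffle (key1 key2 : Int) (cs : List Char) :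
    (List.map (fun p : Char × Char => [p.1, p.2])
        ((List.map (fun c => pvShiftB c key1) (pvEO cs)).zip
          (List.map (fun c => pvShiftB c key2) (pvEO cs.tail)))).flatten
      ++ List.drop (List.map (fun c => pvShiftB c key2) (pvEO cs.tail)).length
          (List.map (fun c => pvShiftB c key1) (pvEO cs))
      = pvAlt key1 key2 cs := by
  induction cs using pvEO.induct with
  | case1 => rfl
  | case2 c => simp [pvEO, pvAlt, pv_encA_eq_shiftB]
  | case3 c d cs ih =>
    have heo : pvEO (c :: d :: cs) = c :: pvEO cs := rfl
    have heot : (c :: d :: cs).tail = d :: cs := rfl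
    have heo2 : pvEO (d :: cs) = d :: pvEO cs.tail := by
      cases cs <;> rfl
    rw [heot, heo, heo2]
    simp only [List.map_cons, List.zip_cons_cons, List.flatten_cons, List.length_cons,
      List.drop_succ_cons]
    rw [List.append_assoc, ih]
    show pvShiftB c key1 :: pvShiftB d key2 :: pvAlt key1 key2 cs
      = pvAlt key1 key2 (c :: d :: cs)
    rw [pvAlt, pvAlt, pv_encA_eq_shiftB, pv_encA_eq_shiftB]
    rfl

-- ===== VERDICT =====
theorem encryptCaesarCipher_spec : Claim_equal_encryptCaesarCipher := by
  intro text key1 key2 _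
  unfold Spec_encryptCaesarCipher encryptCaesarCipher encryptCaesarCipher_alt
  rw [pv_foldA, pv_slice2_even, pv_slice2_odd]
  simp only [Option.getD_some]
  rw [PySem.List.slice_from_natCast]
  have h0 : PySem.Int.mod 0 2 = 0 := by decide
  rw [if_pos h0, List.nil_append, pv_riffle]
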